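-- pv_equiv track=rewrite | github.com/zhenglin-charlie-li/Learning_Repo | LeetCode_Python/mock/collision.py | solution
-- ===== SOURCE A (Python) =====
-- def solution(centers):
--     collision_count = 0
--     hashmap = {}
--
--     for center in centers:
--         x, y = center
--         potential_collisions = []
--
--         # Collect potential collisions around the center
--         for i in range(-2, 3):  # This loop will run 5 times: -2, -1, 0, 1, 2
--             for j in range(-2, 3):
--                 potential_collisions.append((x + i, y + j))
--
--         # Check for actual collisions
--         for pc in potential_collisions:
--             if pc in hashmap:
--                 collision_count += hashmap[pc]
--
--         # Add current center to hashmap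
--         center_tuple = tuple(center)
--         if center_tuple in hashmap:
--             hashmap[center_tuple] += 1
--         else:
--             hashmap[center_tuple] = 1
--
--     return collision_count
-- ===== SOURCE B (Python) =====
-- def solution(centers):
--     collision_count = 0
--     seen = []
--     for x, y in centers:
--         for sx, sy in seen:
--             if abs(sx - x) <= 2 and abs(sy - y) <= 2:
--                 collision_count += 1
--         seen.append((x, y))
--     return collision_count
-- ===== Notes on version B (the rewrite author's own statement) =====
-- stated objective: simpler
-- what changed: Replaces the 25-point neighborhood enumeration against a coordinate-count dict with a direct scan over the list of previously-processed centers using abs(dx)<=2 and abs(dy)<=2.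
import Mathlib
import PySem

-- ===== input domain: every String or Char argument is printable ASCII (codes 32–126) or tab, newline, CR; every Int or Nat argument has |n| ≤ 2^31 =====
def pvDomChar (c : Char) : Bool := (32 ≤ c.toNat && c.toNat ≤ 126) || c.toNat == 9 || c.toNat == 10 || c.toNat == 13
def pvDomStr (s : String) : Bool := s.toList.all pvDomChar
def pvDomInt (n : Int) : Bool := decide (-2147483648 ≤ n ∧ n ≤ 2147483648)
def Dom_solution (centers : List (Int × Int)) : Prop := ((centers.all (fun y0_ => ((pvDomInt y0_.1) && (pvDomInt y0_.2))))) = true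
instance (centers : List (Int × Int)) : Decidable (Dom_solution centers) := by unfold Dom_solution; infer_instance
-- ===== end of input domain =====

-- B replaces the 25-point dict lookup with a direct scan of previously-seen centers (simpler).

-- ===== PORT A =====
def solution (centers : List (Int × Int)) : Int :=
  (centers.foldl
    (fun (st : Int × PySem.Dict (Int × Int) Int) center =>
      let x := center.1
      let y := center.2
      -- nested for-loops appending the 5×5 neighborhood
      let potential_collisions : List (Int × Int) :=
        (PySem.List.pyRange (-2) 3 1).foldl
          (fun acc i =>
            (PySem.List.pyRange (-2) 3 1).foldl
              (fun acc2 j => acc2 ++ [(x + i, y + j)]) acc) []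
      -- if pc in hashmap: collision_count += hashmap[pc]
      let cc :=
        potential_collisions.foldl
          (fun acc pc =>
            match st.2.get? pc with
            | some v => acc + v
            | none => acc) st.1
      -- if center_tuple in hashmap: +=1 else: =1
      let d :=
        match st.2.get? (x, y) with
        | some v => st.2.insert (x, y) (v + 1)
        | none => st.2.insert (x, y) 1
      (cc, d))
    (0, PySem.Dict.empty)).1

-- ===== PORT B =====
def solution_alt (centers : List (Int × Int)) : Int :=
  (centers.foldl
    (fun (st : Int × List (Int × Int)) c =>
      let cc := st.1 +
        ((st.2.filter (fun s => decide (|s.1 - c.1| ≤ 2 ∧ |s.2 - c.2| ≤ 2))).length : Int)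
      (cc, st.2 ++ [c]))
    (0, [])).1

-- ===== PRECONDITION & SPEC =====
def Spec_solution (centers : List (Int × Int)) (out : Int) : Prop := out = solution_alt centers
instance (centers : List (Int × Int)) (out : Int) : Decidable (Spec_solution centers out) := by unfold Spec_solution; infer_instance

-- ===== CLAIM (what is proved, stated in full; the proofs are below) =====
def Claim_equal_solution : Prop := ∀ (centers : List (Int × Int)), Dom_solution centers → Spec_solution centers (solution centers)

-- ===== LEMMAS AND PROOFS =====

-- the 5×5 neighborhood of (x, y), as A builds it
def pvWindow (x y : Int) : List (Int × Int) :=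
  (PySem.List.pyRange (-2) 3 1).flatMap
    (fun i => (PySem.List.pyRange (-2) 3 1).map (fun j => (x + i, y + j)))

lemma pvWindow_eq_fold (x y : Int) :
    (PySem.List.pyRange (-2) 3 1).foldl
      (fun acc i =>
        (PySem.List.pyRange (-2) 3 1).foldl
          (fun acc2 j => acc2 ++ [(x + i, y + j)]) acc) [] = pvWindow x y := by
  have h : ∀ (L : List Int) (acc : List (Int × Int)),
      L.foldl
        (fun acc i =>
          (PySem.List.pyRange (-2) 3 1).foldl
            (fun acc2 j => acc2 ++ [(x + i, y + j)]) acc) acc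
      = acc ++ L.flatMap (fun i => (PySem.List.pyRange (-2) 3 1).map (fun j => (x + i, y + j))) := by
    intro L
    induction L with
    | nil => intro acc; simp
    | cons i L ih =>
      intro acc
      rw [List.foldl_cons, ih, PySem.List.foldl_append_singleton_eq_map,
          List.flatMap_cons, List.append_assoc]
  simpa [pvWindow] using h (PySem.List.pyRange (-2) 3 1) []

-- count of a pair in a mapped row
lemma pvCount_row (J : List Int) (hJ : J.Nodup) (x y i a b : Int) :
    ((J.map (fun j => (x + i, y + j))).count (a, b) : Int)
      = if a = x + i ∧ b - y ∈ J then 1 else 0 := by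
  induction J with
  | nil => simp
  | cons j J ih =>
    have hnd := List.nodup_cons.mp hJ
    rw [List.map_cons, List.count_cons]
    push_cast
    rw [ih hnd.2]
    simp only [beq_iff_eq, Prod.mk.injEq, List.mem_cons]
    by_cases h1 : a = x + i
    · by_cases h2 : b = y + j
      · have hm : ¬ b - y ∈ J := by rw [show b - y = j by omega]; exact hnd.1
        rw [if_neg (by tauto), if_pos ⟨by omega, by omega⟩, if_pos ⟨h1, Or.inl (by omega)⟩]
        try norm_num
      · by_cases h3 : b - y ∈ J
        · rw [if_pos ⟨h1, h3⟩, if_neg (by rintro ⟨_, hh⟩; exact h2 (by omega)),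
              if_pos ⟨h1, Or.inr h3⟩]
          try norm_num
        · have hr : ¬ (a = x + i ∧ (b - y = j ∨ b - y ∈ J)) := by
            rintro ⟨_, hj | hj⟩
            · exact h2 (by omega)
            · exact h3 hj
          rw [if_neg (by tauto), if_neg (by rintro ⟨_, hh⟩; exact h2 (by omega)), if_neg hr]
          try norm_num
    · rw [if_neg (by tauto), if_neg (by rintro ⟨hh, _⟩; exact h1 (by omega)),
          if_neg (by tauto)]
      try norm_num

lemma pvCount_window (x y a b : Int) :
    ((pvWindow x y).count (a, b) : Int)
      = if |a - x| ≤ 2 ∧ |b - y| ≤ 2 then 1 else 0 := by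
  have key : ∀ (I : List Int), I.Nodup →
      ((I.flatMap (fun i => (PySem.List.pyRange (-2) 3 1).map (fun j => (x + i, y + j)))).count (a, b) : Int)
        = if a - x ∈ I ∧ b - y ∈ PySem.List.pyRange (-2) 3 1 then 1 else 0 := by
    intro I hI
    induction I with
    | nil => simp
    | cons i I ih =>
      have hnd := List.nodup_cons.mp hI
      rw [List.flatMap_cons, List.count_append]
      push_cast
      rw [pvCount_row _ (PySem.List.nodup_pyRange_one (-2) 3) x y i a b, ih hnd.2]
      simp only [List.mem_cons]
      by_cases hb : b - y ∈ PySem.List.pyRange (-2) 3 1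
      · by_cases h1 : a = x + i
        · have hm : ¬ a - x ∈ I := by rw [show a - x = i by omega]; exact hnd.1
          rw [if_pos ⟨h1, hb⟩, if_neg (by tauto), if_pos ⟨Or.inl (by omega), hb⟩]
          try norm_num
        · by_cases h3 : a - x ∈ I
          · rw [if_neg (by rintro ⟨hh, _⟩; exact h1 (by omega)), if_pos ⟨h3, hb⟩,
                if_pos ⟨Or.inr h3, hb⟩]
            try norm_num
          · have hr : ¬ ((a - x = i ∨ a - x ∈ I) ∧ b - y ∈ PySem.List.pyRange (-2) 3 1) := by
              rintro ⟨hj | hj, _⟩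
              · exact h1 (by omega)
              · exact h3 hj
            rw [if_neg (by rintro ⟨hh, _⟩; exact h1 (by omega)), if_neg (by tauto), if_neg hr]
            try norm_num
      · rw [if_neg (by tauto), if_neg (by tauto), if_neg (by tauto)]
        try norm_num
  have h := key (PySem.List.pyRange (-2) 3 1) (PySem.List.nodup_pyRange_one (-2) 3)
  rw [pvWindow, h]
  have h1 : (a - x ∈ PySem.List.pyRange (-2) 3 1) ↔ |a - x| ≤ 2 := by
    rw [PySem.List.mem_pyRange_one, abs_le]
    omega
  have h2 : (b - y ∈ PySem.List.pyRange (-2) 3 1) ↔ |b - y| ≤ 2 := by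
    rw [PySem.List.mem_pyRange_one, abs_le]
    omega
  simp only [h1, h2]

-- sum of per-point counts over the window = number of seen centers within the window
lemma pvSum_ite_count (l : List (Int × Int)) (s : Int × Int) :
    (l.map (fun p => if s = p then (1 : Int) else 0)).sum = (l.count s : Int) := by
  induction l with
  | nil => simp
  | cons a l ih =>
    rw [List.map_cons, List.sum_cons, ih, List.count_cons]
    push_cast
    simp only [beq_iff_eq]
    split_ifs <;> first | omega | simp_all

lemma pvSum_window_countP (x y : Int) (seen : List (Int × Int)) :
    (((pvWindow x y).map (fun p => (seen.count p : Int))).sum)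
      = ((seen.countP (fun s => decide (|s.1 - x| ≤ 2 ∧ |s.2 - y| ≤ 2))) : Int) := by
  induction seen with
  | nil => simp
  | cons s seen ih =>
    have hmap : (pvWindow x y).map (fun p => (((s :: seen).count p : Nat) : Int))
        = (pvWindow x y).map (fun p => (seen.count p : Int) + (if s = p then 1 else 0)) := by
      apply List.map_congr_left
      intro p _
      rw [List.count_cons]
      push_cast
      simp [beq_iff_eq]
    rw [hmap, PySem.List.sum_map_add_int, ih, pvSum_ite_count]
    obtain ⟨a, b⟩ := s
    rw [pvCount_window, List.countP_cons]
    push_cast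
    by_cases hp : |a - x| ≤ 2 ∧ |b - y| ≤ 2 <;> simp [hp]

lemma pvSum_window (x y : Int) (seen : List (Int × Int)) :
    (((pvWindow x y).map (fun p => (seen.count p : Int))).sum)
      = ((seen.filter (fun s => decide (|s.1 - x| ≤ 2 ∧ |s.2 - y| ≤ 2))).length : Int) := by
  rw [pvSum_window_countP]
  simp [List.countP_eq_length_filter]

-- A's inner collision fold as a sum of getD
lemma pvFold_getD (d : PySem.Dict (Int × Int) Int) (pcs : List (Int × Int)) (acc : Int) :
    pcs.foldl (fun a pc => match d.get? pc with | some v => a + v | none => a) acc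
      = acc + (pcs.map (fun p => d.getD p 0)).sum := by
  have : (fun (a : Int) (pc : Int × Int) => match d.get? pc with | some v => a + v | none => a)
      = (fun a pc => a + d.getD pc 0) := by
    funext a pc
    cases h : d.get? pc <;> simp [PySem.Dict.getD, h]
  rw [this, PySem.List.foldl_add]

-- A's dict update as the counter insert pattern
lemma pvUpdate_eq (d : PySem.Dict (Int × Int) Int) (c : Int × Int) :
    (match d.get? c with | some v => d.insert c (v + 1) | none => d.insert c 1)
      = d.insert c (d.getD c 0 + 1) := by
  cases h : d.get? c <;> simp [PySem.Dict.getD, h]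

lemma pvCounter_snoc (seen : List (Int × Int)) (c : Int × Int) :
    PySem.Dict.counter (seen ++ [c])
      = (PySem.Dict.counter seen).insert c ((PySem.Dict.counter seen).getD c 0 + 1) := by
  rw [← PySem.Dict.foldl_insert_getD_add_one_eq_counter,
      ← PySem.Dict.foldl_insert_getD_add_one_eq_counter]
  rw [List.foldl_append]
  simp

-- main invariant: A's fold over a counter dict of `seen` matches B's fold over `seen`
lemma pvMain (cs : List (Int × Int)) :
    ∀ (acc : Int) (seen : List (Int × Int)),
    (cs.foldl
      (fun (st : Int × PySem.Dict (Int × Int) Int) center =>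
        let x := center.1
        let y := center.2
        let potential_collisions : List (Int × Int) :=
          (PySem.List.pyRange (-2) 3 1).foldl
            (fun acc i =>
              (PySem.List.pyRange (-2) 3 1).foldl
                (fun acc2 j => acc2 ++ [(x + i, y + j)]) acc) []
        let cc :=
          potential_collisions.foldl
            (fun acc pc =>
              match st.2.get? pc with
              | some v => acc + v
              | none => acc) st.1
        let d :=
          match st.2.get? (x, y) with
          | some v => st.2.insert (x, y) (v + 1)
          | none => st.2.insert (x, y) 1
        (cc, d))
      (acc, PySem.Dict.counter seen)).1
    = (cs.foldl
        (fun (st : Int × List (Int × Int)) c =>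
          let cc := st.1 +
            ((st.2.filter (fun s => decide (|s.1 - c.1| ≤ 2 ∧ |s.2 - c.2| ≤ 2))).length : Int)
          (cc, st.2 ++ [c]))
        (acc, seen)).1 := by
  induction cs with
  | nil => intro acc seen; rfl
  | cons c cs ih =>
    intro acc seen
    simp only [List.foldl_cons]
    have hacc :
        ((PySem.List.pyRange (-2) 3 1).foldl
            (fun acc i =>
              (PySem.List.pyRange (-2) 3 1).foldl
                (fun acc2 j => acc2 ++ [(c.1 + i, c.2 + j)]) acc) []).foldl
          (fun a pc =>
            match (PySem.Dict.counter seen).get? pc with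
            | some v => a + v
            | none => a) acc
        = acc +
          ((seen.filter (fun s => decide (|s.1 - c.1| ≤ 2 ∧ |s.2 - c.2| ≤ 2))).length : Int) := by
      rw [pvWindow_eq_fold, pvFold_getD]
      congr 1
      have hm : (pvWindow c.1 c.2).map (fun p => (PySem.Dict.counter seen).getD p 0)
          = (pvWindow c.1 c.2).map (fun p => (seen.count p : Int)) := by
        apply List.map_congr_left
        intro p _
        exact PySem.Dict.getD_counter seen p
      rw [hm, pvSum_window]
    have hdict :
        (match (PySem.Dict.counter seen).get? (c.1, c.2) with
          | some v => (PySem.Dict.counter seen).insert (c.1, c.2) (v + 1)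
          | none => (PySem.Dict.counter seen).insert (c.1, c.2) 1)
        = PySem.Dict.counter (seen ++ [c]) := by
      rw [pvUpdate_eq, pvCounter_snoc]
    simp only at hacc hdict ⊢
    rw [hacc, hdict]
    exact ih _ (seen ++ [c])

-- ===== VERDICT (by name: the statement is the Claim_ definition above) =====
theorem solution_spec : Claim_equal_solution := by
  intro centers _
  unfold Spec_solution solution solution_alt
  have := pvMain centers 0 []
  simpa [PySem.Dict.counter] using this
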